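-- pv_equiv track=rewrite | github.com/alooffool/exercise | com.hackerrank/30_days_of_code/day29.py | isFunny
-- ===== SOURCE A (Python) =====
-- def isFunny(string):
--     length = len(string)
--     # At the midpoint of the string, further comparisons are redundant.
--     # An even length N and an odd length N-1 require the same number of comparisons.
--     # Use integer division to avoid importing math.ceil() to handle odd lengths.
--     comparisons = length//2 + length%2 - 1
--     # Compare the gaps from both directions.
--     for i in range(comparisons):
--         gap_forward = abs(ord(string[i]) - ord(string[i+1]))
--         gap_reverse = abs(ord(string[length-i-1]) - ord(string[length-i-2]))
--         if gap_forward != gap_reverse: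
--             return False
--     return True
-- ===== SOURCE B (Python) =====
-- def isFunny(string):
--     gaps = [abs(ord(string[i]) - ord(string[i + 1])) for i in range(len(string) - 1)]
--     return gaps == gaps[::-1]
-- ===== Notes on version B (the rewrite author's own statement) =====
-- stated objective: simpler
-- what changed: Replaces the two-pointer loop with an arithmetically derived comparison count by materializing the full list of adjacent gaps once and testing it for palindromeness against its reverse.
import Mathlib
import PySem

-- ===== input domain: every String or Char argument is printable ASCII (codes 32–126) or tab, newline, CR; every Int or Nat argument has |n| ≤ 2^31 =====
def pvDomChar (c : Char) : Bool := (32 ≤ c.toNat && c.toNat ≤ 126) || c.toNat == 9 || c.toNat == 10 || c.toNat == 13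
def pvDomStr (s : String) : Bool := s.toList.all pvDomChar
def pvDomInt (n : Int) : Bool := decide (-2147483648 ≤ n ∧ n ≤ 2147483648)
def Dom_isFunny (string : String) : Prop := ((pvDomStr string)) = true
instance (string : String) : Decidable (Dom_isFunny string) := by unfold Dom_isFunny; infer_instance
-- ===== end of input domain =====

-- B builds the full adjacent-gap list and compares it with its reverse, instead of A's
-- two-pointer walk over an arithmetically derived number of comparisons (objective: simpler).


-- ===== PORT A =====
-- ord(string[i]) : indices produced by the loop are always in range, so pyGetD is exact here
def ordA (l : List Char) (i : Int) : Int := ((PySem.List.pyGetD l i ' ').toNat : Int)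

-- the for-loop over range(comparisons) with early 'return False'
def isFunnyLoop (l : List Char) (length : Int) : List Int → Bool
  | [] => true
  | i :: rest =>
    if |ordA l i - ordA l (i + 1)| ≠ |ordA l (length - i - 1) - ordA l (length - i - 2)| then
      false
    else
      isFunnyLoop l length rest

def isFunny (string : String) : Bool :=
  let l := string.toList
  let length : Int := l.length
  let comparisons : Int := PySem.Int.floordiv length 2 + PySem.Int.mod length 2 - 1
  isFunnyLoop l length (PySem.List.pyRange 0 comparisons 1)

-- ===== PORT B =====
def ordB (l : List Char) (i : Int) : Int := ((PySem.List.pyGetD l i ' ').toNat : Int)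

def isFunny_alt (string : String) : Bool :=
  let l := string.toList
  let gaps : List Int :=
    (PySem.List.pyRange 0 ((l.length : Int) - 1) 1).map
      (fun i => |ordB l i - ordB l (i + 1)|)
  -- gaps[::-1] is List.reverse (PySem.List.slice?_none_none_neg_one)
  gaps == gaps.reverse

-- ===== PRECONDITION & SPEC =====
def Spec_isFunny (string : String) (out : Bool) : Prop := out = isFunny_alt string
instance (string : String) (out : Bool) : Decidable (Spec_isFunny string out) := by unfold Spec_isFunny; infer_instance

-- ===== CLAIM (what is proved, stated in full; the proofs are below) =====
def Claim_equal_isFunny : Prop := ∀ (string : String), Dom_isFunny string → Spec_isFunny string (isFunny string)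

-- ===== LEMMAS AND PROOFS =====

-- the k-th adjacent gap, Nat-indexed
def gapN (l : List Char) (k : Nat) : Int :=
  |((l.getD k ' ').toNat : Int) - ((l.getD (k + 1) ' ').toNat : Int)|

theorem isFunnyLoop_eq_all (l : List Char) (length : Int) (is : List Int) :
    isFunnyLoop l length is =
      decide (∀ i ∈ is,
        |ordA l i - ordA l (i + 1)| = |ordA l (length - i - 1) - ordA l (length - i - 2)|) := by
  induction is with
  | nil => simp [isFunnyLoop]
  | cons i rest ih =>
    by_cases h : |ordA l i - ordA l (i + 1)| = |ordA l (length - i - 1) - ordA l (length - i - 2)|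
    · simp [isFunnyLoop, h, ih]
    · simp [isFunnyLoop, h]

theorem A_iff (s : String) (l : List Char) (hl : s.toList = l) :
    (isFunny s = true) ↔
      ∀ k : Nat, k < (l.length - 1) / 2 → gapN l k = gapN l (l.length - 2 - k) := by
  simp only [isFunny, hl, isFunnyLoop_eq_all, decide_eq_true_eq,
    PySem.List.mem_pyRange_one]
  constructor
  · intro h k hk
    have hn : 2 ≤ l.length := by omega
    have hc : (0 : Int) ≤ (k : Int) ∧
        (k : Int) < PySem.Int.floordiv (l.length : Int) 2 + PySem.Int.mod (l.length : Int) 2 - 1 := by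
      rw [show ((2:Int) = ((2:Nat):Int)) from rfl, PySem.Int.floordiv_natCast, PySem.Int.mod_natCast]
      constructor
      · positivity
      · push_cast; omega
    have := h (k : Int) hc
    simp only [ordA, PySem.List.pyGetD_natCast] at this ⊢
    have e1 : ((k : Int) + 1) = ((k + 1 : Nat) : Int) := by push_cast; ring
    have e2 : ((l.length : Int) - (k : Int) - 1) = ((l.length - 1 - k : Nat) : Int) := by
      omega
    have e3 : ((l.length : Int) - (k : Int) - 2) = ((l.length - 2 - k : Nat) : Int) := by
      omega
    rw [e1, e2, e3] at this
    simp only [PySem.List.pyGetD_natCast] at this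
    have e4 : l.length - 2 - k + 1 = l.length - 1 - k := by omega
    rw [gapN, gapN, e4, this]
    exact abs_sub_comm _ _
  · intro h i hi
    obtain ⟨hi0, hc2⟩ := hi
    rw [show ((2:Int) = ((2:Nat):Int)) from rfl, PySem.Int.floordiv_natCast, PySem.Int.mod_natCast] at hc2
    obtain ⟨k, rfl⟩ : ∃ k : Nat, i = (k : Int) := ⟨i.toNat, by omega⟩
    have hk : k < (l.length - 1) / 2 := by push_cast at hc2; omega
    have hn : 2 ≤ l.length := by omega
    have := h k hk
    simp only [ordA]
    have e1 : ((k : Int) + 1) = ((k + 1 : Nat) : Int) := by push_cast; ring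
    have e2 : ((l.length : Int) - (k : Int) - 1) = ((l.length - 1 - k : Nat) : Int) := by
      omega
    have e3 : ((l.length : Int) - (k : Int) - 2) = ((l.length - 2 - k : Nat) : Int) := by
      omega
    rw [e1, e2, e3]
    simp only [PySem.List.pyGetD_natCast]
    have e4 : l.length - 2 - k + 1 = l.length - 1 - k := by omega
    rw [gapN, gapN, e4] at this
    rw [this, abs_sub_comm]

theorem gaps_eq (l : List Char) :
    (PySem.List.pyRange 0 ((l.length : Int) - 1) 1).map
        (fun i => |ordB l i - ordB l (i + 1)|) =
      (List.range (l.length - 1)).map (gapN l) := by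
  have e : ((l.length : Int) - 1 - 0).toNat = l.length - 1 := by omega
  rw [PySem.List.pyRange_one, e, List.map_map]
  apply List.map_congr_left
  intro k hk
  simp only [Function.comp, zero_add, ordB, gapN]
  have e1 : ((k : Int) + 1) = ((k + 1 : Nat) : Int) := by push_cast; ring
  rw [e1]
  simp only [PySem.List.pyGetD_natCast]

theorem B_iff (s : String) (l : List Char) (hl : s.toList = l) :
    (isFunny_alt s = true) ↔
      ∀ k : Nat, k < (l.length - 1) / 2 → gapN l k = gapN l (l.length - 2 - k) := by
  simp only [isFunny_alt, hl, gaps_eq, beq_iff_eq]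
  set m := l.length - 1 with hm
  constructor
  · intro h k hk
    have hkm : k < m := by omega
    have hk1 : k < (List.map (gapN l) (List.range m)).length := by simp [hkm]
    have h2 := List.getElem_of_eq h hk1
    rw [List.getElem_reverse] at h2
    simp only [List.getElem_map, List.getElem_range, List.length_map, List.length_range] at h2
    rw [show l.length - 2 - k = m - 1 - k by omega]
    exact h2
  · intro h
    apply List.ext_getElem
    · simp
    · intro k h1 h2
      rw [List.length_map, List.length_range] at h1
      simp only [List.getElem_reverse, List.getElem_map, List.getElem_range,
        List.length_map, List.length_range]
      by_cases hlt : k < m / 2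
      · rw [show m - 1 - k = l.length - 2 - k by omega]
        exact h k (by omega)
      · by_cases heq2 : k = m - 1 - k
        · rw [← heq2]
        · have h' : m - 1 - k < m / 2 := by omega
          have h3 := h (m - 1 - k) (by omega)
          rw [show l.length - 2 - (m - 1 - k) = k by omega] at h3
          rw [show m - 1 - k = l.length - 2 - k by omega] at h3 ⊢
          exact h3.symm

-- ===== VERDICT (by name: the statement is the Claim_ definition above) =====
theorem isFunny_spec : Claim_equal_isFunny := by
  intro string _
  unfold Spec_isFunny
  rw [Bool.eq_iff_iff, A_iff string string.toList rfl, B_iff string string.toList rfl]
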